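-- pv_equiv track=rewrite | github.com/cristian20021/LeetCode | 4011-smallest-absent-positive-greater-than-average/4011-smallest-absent-positive-greater-than-average.py | smallestAbsent
-- ===== SOURCE A (Python) =====
-- def smallestAbsent(nums):
--
--     average = sum(nums)//len(nums)
--     if average<0:
--         toRet = 1
--     else:
--         toRet = average+1
--     while toRet in nums:
--         toRet+=1
--     return toRet
-- ===== SOURCE B (Python) =====
-- def smallestAbsent(nums):
--     start = max(sum(nums) // len(nums) + 1, 1)
--     present = set(nums)
--     candidates = set(range(start, start + len(nums) + 1))
--     return min(candidates - present)
-- ===== Notes on version B (the rewrite author's own statement) =====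
-- stated objective: alternative
-- what changed: Replaces the while-loop that repeatedly tests candidates against the list by a one-shot computation: the answer must lie in [start, start+len(nums)], so B takes the min of that candidate range minus the set of nums.
import Mathlib
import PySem

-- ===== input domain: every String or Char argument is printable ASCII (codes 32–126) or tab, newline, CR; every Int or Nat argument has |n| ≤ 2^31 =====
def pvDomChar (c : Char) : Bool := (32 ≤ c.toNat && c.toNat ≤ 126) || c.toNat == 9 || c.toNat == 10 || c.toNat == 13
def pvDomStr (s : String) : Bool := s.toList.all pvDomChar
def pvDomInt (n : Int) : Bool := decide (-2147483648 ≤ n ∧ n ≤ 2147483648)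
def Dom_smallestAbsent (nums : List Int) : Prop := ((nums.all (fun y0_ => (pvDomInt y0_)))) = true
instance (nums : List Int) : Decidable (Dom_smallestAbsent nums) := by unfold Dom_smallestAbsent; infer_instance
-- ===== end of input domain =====

-- B replaces A's candidate-probing while-loop by a one-shot set difference: the answer
-- lies in [start, start+len(nums)], so B returns min of that range minus set(nums).

-- ===== PORT A =====
-- termination helper for the literal 'while toRet in nums: toRet += 1' loop
theorem pvLoopMeasure_lt (nums : List Int) (t : Int) (h : t ∈ nums) :
    (nums.filter (fun x => t + 1 ≤ x)).length < (nums.filter (fun x => t ≤ x)).length := by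
  have hsub : (nums.filter (fun x => decide (t + 1 ≤ x))).Sublist
      (nums.filter (fun x => decide (t ≤ x))) :=
    List.monotone_filter_right nums (by intro x hx; simp at hx ⊢; omega)
  rcases lt_or_eq_of_le hsub.length_le with hlt | heq
  · simpa using hlt
  · exfalso
    have heqlist := hsub.eq_of_length heq
    have ht1 : t ∈ nums.filter (fun x => decide (t ≤ x)) := by
      simp [List.mem_filter, h]
    rw [← heqlist] at ht1
    simp [List.mem_filter] at ht1

def smallestAbsentLoop (nums : List Int) (t : Int) : Int :=
  if h : t ∈ nums then smallestAbsentLoop nums (t + 1) else t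
termination_by (nums.filter (fun x => t ≤ x)).length
decreasing_by exact pvLoopMeasure_lt nums t h

def smallestAbsent (nums : List Int) : Int :=
  let average := PySem.Int.floordiv nums.sum (nums.length : Int)
  let toRet := if average < 0 then 1 else average + 1
  smallestAbsentLoop nums toRet

-- ===== PORT B =====
def smallestAbsent_alt (nums : List Int) : Int :=
  let start := max (PySem.Int.floordiv nums.sum (nums.length : Int) + 1) 1
  let present : PySem.Set Int := PySem.Set.ofList nums
  let candidates : PySem.Set Int :=
    PySem.Set.ofList (PySem.List.pyRange start (start + (nums.length : Int) + 1) 1)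
  (PySem.List.min? (PySem.Set.diff candidates present) (fun x => x)).getD 0

-- ===== PRECONDITION & SPEC =====
-- A divides by len(nums): the empty list raises ZeroDivisionError, and is excluded.
def Pre_smallestAbsent (nums : List Int) : Prop := nums ≠ []
instance (nums : List Int) : Decidable (Pre_smallestAbsent nums) := by
  unfold Pre_smallestAbsent; infer_instance
def pvWitness_smallestAbsent : List Int := [3, 1, 4]

def Spec_smallestAbsent (nums : List Int) (out : Int) : Prop := out = smallestAbsent_alt nums
instance (nums : List Int) (out : Int) : Decidable (Spec_smallestAbsent nums out) := by
  unfold Spec_smallestAbsent; infer_instance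

-- ===== CLAIM (what is proved, stated in full; the proofs are below) =====
def Claim_equal_smallestAbsent : Prop :=
  ∀ (nums : List Int), Dom_smallestAbsent nums → Pre_smallestAbsent nums →
    Spec_smallestAbsent nums (smallestAbsent nums)

-- ===== LEMMAS AND PROOFS =====

theorem loop_not_mem (nums : List Int) (t : Int) : smallestAbsentLoop nums t ∉ nums := by
  fun_induction smallestAbsentLoop nums t with
  | case1 t h ih => exact ih
  | case2 t h => exact h

theorem loop_ge (nums : List Int) (t : Int) : t ≤ smallestAbsentLoop nums t := by
  fun_induction smallestAbsentLoop nums t with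
  | case1 t h ih => omega
  | case2 t h => omega

theorem loop_min (nums : List Int) (t : Int) :
    ∀ u, t ≤ u → u ∉ nums → smallestAbsentLoop nums t ≤ u := by
  fun_induction smallestAbsentLoop nums t with
  | case1 t h ih =>
    intro u hu hmem
    have : t ≠ u := by rintro rfl; exact hmem h
    exact ih u (by omega) hmem
  | case2 t h => intro u hu _; omega

-- every integer in [t, loop) is in nums
theorem loop_below_mem (nums : List Int) (t : Int) :
    ∀ u, t ≤ u → u < smallestAbsentLoop nums t → u ∈ nums := by
  intro u hu hlt
  by_contra hmem
  have := loop_min nums t u hu hmem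
  omega

theorem loop_le_add_length (nums : List Int) (t : Int) :
    smallestAbsentLoop nums t ≤ t + (nums.length : Int) := by
  set L := smallestAbsentLoop nums t with hL
  have hge := loop_ge nums t
  have hsub : PySem.List.pyRange t L 1 ⊆ PySem.Set.ofList nums := by
    intro x hx
    rw [PySem.List.mem_pyRange_one] at hx
    rw [PySem.Set.mem_ofList]
    exact loop_below_mem nums t x hx.1 hx.2
  have hnd := PySem.List.nodup_pyRange_one (a := t) (b := L)
  have hlen := (List.subperm_of_subset hnd hsub).length_le
  have h1 : (PySem.List.pyRange t L 1).length = (L - t).toNat :=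
    PySem.List.length_pyRange_one t L
  have h2 : (PySem.Set.ofList nums : List Int).length ≤ nums.length :=
    (List.subperm_of_subset (PySem.Set.nodup_ofList nums)
      (fun x hx => (PySem.Set.mem_ofList _ _).mp hx)).length_le
  omega

theorem smallestAbsent_eq_loop_max (nums : List Int) :
    smallestAbsent nums =
      smallestAbsentLoop nums (max (PySem.Int.floordiv nums.sum (nums.length : Int) + 1) 1) := by
  have hst : ∀ a : Int, (if a < 0 then (1:Int) else a + 1) = max (a + 1) 1 := by
    intro a; split_ifs <;> omega
  simp only [smallestAbsent, hst]

-- ===== VERDICT (by name: the statement is the Claim_ definition above) =====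
theorem smallestAbsent_spec : Claim_equal_smallestAbsent := by
  intro nums _ hpre
  unfold Spec_smallestAbsent smallestAbsent_alt
  rw [smallestAbsent_eq_loop_max]
  set s : Int := max (PySem.Int.floordiv nums.sum (nums.length : Int) + 1) 1 with hs
  set L : Int := smallestAbsentLoop nums s with hLdef
  set cand : PySem.Set Int :=
    PySem.Set.ofList (PySem.List.pyRange s (s + (nums.length : Int) + 1) 1) with hcand
  set present : PySem.Set Int := PySem.Set.ofList nums with hpres
  have hge := loop_ge nums s
  have hle := loop_le_add_length nums s
  have hLmem : L ∈ PySem.Set.diff cand present := by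
    rw [PySem.Set.mem_diff]
    constructor
    · rw [hcand, PySem.Set.mem_ofList, PySem.List.mem_pyRange_one]
      omega
    · rw [hpres, PySem.Set.mem_ofList]
      exact loop_not_mem nums s
  have hLmin : ∀ y ∈ PySem.Set.diff cand present, L ≤ y := by
    intro y hy
    rw [PySem.Set.mem_diff, hcand, hpres, PySem.Set.mem_ofList, PySem.Set.mem_ofList,
      PySem.List.mem_pyRange_one] at hy
    exact loop_min nums s y hy.1.1 hy.2
  show L = (PySem.List.min? (PySem.Set.diff cand present) (fun x => x)).getD 0
  rcases hmin : PySem.List.min? (PySem.Set.diff cand present) (fun x => x) with _ | m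
  · rw [PySem.List.min?_eq_none_iff] at hmin
    rw [hmin] at hLmem
    simp at hLmem
  · have hmem := PySem.List.min?_mem hmin
    have h1 : m ≤ L := PySem.List.min?_isMin hmin L hLmem
    have h2 : L ≤ m := hLmin m hmem
    rw [Option.getD_some]
    omega
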